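-- pv_equiv track=rewrite | github.com/mariok99/introProgamacion | CMS2/borrador.py | contarUnaMeseta
-- ===== SOURCE A (Python) =====
-- def contarUnaMeseta (l: list[int]) -> int:
--     meseta: int = 1
--     i: int = 0
--     if len(l) > 0:
--         while i < (len(l) - 1) and l[i] == l[i + 1]:
--             meseta = meseta + 1
--             i = i + 1
--     else:
--         meseta = 0
--
--     return meseta
-- ===== SOURCE B (Python) =====
-- def contarUnaMeseta(l: list[int]) -> int:
--     # Divide and conquer: the leading plateau of l is the plateau of the left
--     # half, extended into the right half only if the left half is one full
--     # plateau and it continues across the split point.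
--     n = len(l)
--     if n <= 1:
--         return n
--     mid = n // 2
--     left, right = l[:mid], l[mid:]
--     p = contarUnaMeseta(left)
--     if p == mid and left[-1] == right[0]:
--         return mid + contarUnaMeseta(right)
--     return p
-- ===== Notes on version B (the rewrite author's own statement) =====
-- stated objective: alternative
-- what changed: Replaces the left-to-right index walk with a divide-and-conquer recursion: split the list in half, compute the left half's plateau, and add the right half's plateau only when the left half is entirely one plateau that continues across the split.
import Mathlib
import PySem

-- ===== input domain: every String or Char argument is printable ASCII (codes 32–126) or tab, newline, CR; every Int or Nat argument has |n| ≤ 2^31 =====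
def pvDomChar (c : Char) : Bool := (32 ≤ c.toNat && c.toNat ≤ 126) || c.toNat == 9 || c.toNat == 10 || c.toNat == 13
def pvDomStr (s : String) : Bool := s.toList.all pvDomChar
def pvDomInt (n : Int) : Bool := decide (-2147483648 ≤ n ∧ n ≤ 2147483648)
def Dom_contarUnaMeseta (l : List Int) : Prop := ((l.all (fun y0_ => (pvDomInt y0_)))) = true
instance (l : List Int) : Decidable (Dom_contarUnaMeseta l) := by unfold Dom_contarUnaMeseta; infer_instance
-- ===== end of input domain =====

-- B replaces the index-based while loop with a divide-and-conquer recursion on list halves (alternative; same result, no speed claim).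


-- ===== PORT A =====
-- the while loop: while i < len(l)-1 and l[i] == l[i+1]: meseta += 1; i += 1
-- (structural recursion on a fuel bound; fuel = l.length bounds the iteration count)
def contarUnaMesetaLoop : Nat → List Int → Int → Nat → Int
  | 0, _, meseta, _ => meseta
  | fuel + 1, l, meseta, i =>
    if h : i < l.length - 1 then
      if l[i]'(by omega) = l[i + 1]'(by omega) then
        contarUnaMesetaLoop fuel l (meseta + 1) (i + 1)
      else meseta
    else meseta

def contarUnaMeseta (l : List Int) : Int :=
  if l.length > 0 then contarUnaMesetaLoop l.length l 1 0 else 0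

-- ===== PORT B =====
-- divide and conquer on the two halves l[:mid] and l[mid:]; left[-1] and right[0]
-- are ported as getLast? / head? — both halves are nonempty here (1 ≤ mid < n),
-- so Option equality is exactly Python's value equality of left[-1] == right[0].
-- (structural recursion on a fuel bound; fuel = l.length bounds the recursion depth,
--  the fuel-0 branch is unreachable for fuel ≥ l.length)
def plateauDC : Nat → List Int → Int
  | 0, _ => 0
  | fuel + 1, l =>
    if l.length ≤ 1 then (l.length : Int)
    else
      let mid := l.length / 2
      let left := l.take mid
      let right := l.drop mid
      let p := plateauDC fuel left
      if p = (mid : Int) ∧ left.getLast? = right.head? then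
        (mid : Int) + plateauDC fuel right
      else p

def contarUnaMeseta_alt (l : List Int) : Int := plateauDC l.length l

-- ===== PRECONDITION & SPEC =====
def Spec_contarUnaMeseta (l : List Int) (out : Int) : Prop := out = contarUnaMeseta_alt l
instance (l : List Int) (out : Int) : Decidable (Spec_contarUnaMeseta l out) := by unfold Spec_contarUnaMeseta; infer_instance

-- ===== CLAIM (what is proved, stated in full; the proofs are below) =====
def Claim_equal_contarUnaMeseta : Prop := ∀ (l : List Int), Dom_contarUnaMeseta l → Spec_contarUnaMeseta l (contarUnaMeseta l)

-- ===== LEMMAS AND PROOFS =====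

-- closed form both ports are related to: length of the leading run of equal elements
def mesNat : List Int → Nat
  | [] => 0
  | x :: xs => 1 + (xs.takeWhile (fun y => y == x)).length

-- length of the initial run of adjacent equal elements (A-side invariant shape)
def runLen (l : List Int) : Nat :=
  match l with
  | x :: y :: t => if x = y then 1 + runLen (y :: t) else 0
  | _ => 0

theorem runLen_eq_takeWhile (x : Int) (xs : List Int) :
    runLen (x :: xs) = (xs.takeWhile (fun y => y == x)).length := by
  induction xs generalizing x with
  | nil => simp [runLen]
  | cons y t ih =>
    by_cases h : x = y
    · subst h
      simp [runLen, List.takeWhile, ih]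
      omega
    · have h' : (y == x) = false := by simp [Ne.symm h]
      simp [runLen, h, List.takeWhile, h']

theorem loop_eq_runLen (fuel : Nat) (l : List Int) (m : Int) (i : Nat)
    (hf : l.length - 1 - i ≤ fuel) :
    contarUnaMesetaLoop fuel l m i = m + (runLen (l.drop i) : Int) := by
  induction fuel generalizing m i with
  | zero =>
    have hr : runLen (l.drop i) = 0 := by
      match hd : l.drop i with
      | [] => simp [runLen]
      | [a] => simp [runLen]
      | a :: b :: t =>
        exfalso
        have := List.length_drop (l := l) (i := i)
        rw [hd] at this
        simp at this
        omega
    simp [contarUnaMesetaLoop, hr]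
  | succ fuel ih =>
    by_cases h : i < l.length - 1
    · have hx : l.drop i = l[i]'(by omega) :: l[i+1]'(by omega) :: l.drop (i + 2) := by
        rw [List.drop_eq_getElem_cons (by omega), List.drop_eq_getElem_cons (by omega)]
      by_cases he : l[i]'(by omega) = l[i + 1]'(by omega)
      · rw [contarUnaMesetaLoop]
        simp only [h, he, dif_pos, if_pos]
        rw [ih (m + 1) (i + 1) (by omega)]
        have hd : l.drop (i + 1) = l[i+1]'(by omega) :: l.drop (i + 2) := by
          rw [List.drop_eq_getElem_cons (by omega)]
        rw [hx, hd, runLen]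
        simp [he]
        omega
      · rw [contarUnaMesetaLoop]
        simp only [h, he, dif_pos]
        rw [hx, runLen]
        simp [he]
    · rw [contarUnaMesetaLoop]
      simp only [h, dif_neg, not_false_iff]
      have : runLen (l.drop i) = 0 := by
        match hd : l.drop i with
        | [] => simp [runLen]
        | [a] => simp [runLen]
        | a :: b :: t =>
          exfalso
          have := List.length_drop (l := l) (i := i)
          rw [hd] at this
          simp at this
          omega
      simp [this]

theorem A_eq_mesNat (l : List Int) : contarUnaMeseta l = (mesNat l : Int) := by
  unfold contarUnaMeseta
  match l with
  | [] => simp [mesNat]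
  | x :: xs =>
    simp only [List.length_cons]
    rw [if_pos (by omega), loop_eq_runLen _ _ _ _ (by simp)]
    simp [mesNat, runLen_eq_takeWhile]

theorem getLast?_all_eq (x : Int) (xs : List Int) (h : ∀ y ∈ xs, y = x) :
    (x :: xs).getLast? = some x := by
  induction xs generalizing x with
  | nil => rfl
  | cons y t ih =>
    have hy : y = x := h y (by simp)
    subst hy
    rw [List.getLast?_cons_cons]
    exact ih y (fun z hz => h z (by simp [hz]))

theorem mesNat_append (a b : List Int) (ha : a ≠ []) (hb : b ≠ []) :
    mesNat (a ++ b) =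
      if mesNat a = a.length ∧ a.getLast? = b.head? then a.length + mesNat b
      else mesNat a := by
  match a, b with
  | x :: xs, y :: ys =>
    by_cases hall : ∀ z ∈ xs, z = x
    · have htw : xs.takeWhile (fun z => z == x) = xs :=
        List.takeWhile_eq_self_iff.mpr (by intro z hz; simp [hall z hz])
      have hfull : mesNat (x :: xs) = (x :: xs).length := by
        simp [mesNat, htw]; omega
      have hlast : (x :: xs).getLast? = some x := getLast?_all_eq x xs hall
      have happ : (xs ++ y :: ys).takeWhile (fun z => z == x)
          = xs ++ (y :: ys).takeWhile (fun z => z == x) := by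
        rw [List.takeWhile_append, if_pos (by rw [htw])]
      by_cases hxy : y = x
      · subst hxy
        have hytw : ((y :: ys).takeWhile (fun z => z == y)) = y :: ys.takeWhile (fun z => z == y) := by
          simp [List.takeWhile]
        rw [if_pos ⟨hfull, by simp [hlast]⟩]
        simp [mesNat, List.cons_append, happ, hytw]
        omega
      · have hyx : (y == x) = false := by simp [hxy]
        rw [if_neg (fun hc => by rw [hlast] at hc; exact hxy (by simpa using hc.2.symm))]
        simp [mesNat, List.cons_append, happ, List.takeWhile, hyx, htw]
    · push Not at hall
      obtain ⟨z, hz, hzx⟩ := hall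
      have hne : xs.takeWhile (fun w => w == x) ≠ xs := by
        intro he
        exact hzx (by simpa using (List.takeWhile_eq_self_iff.mp he) z hz)
      have hlt : (xs.takeWhile (fun w => w == x)).length < xs.length :=
        lt_of_le_of_ne (List.takeWhile_prefix _).length_le
          (fun he => hne ((List.takeWhile_prefix _).eq_of_length he))
      have hnot : mesNat (x :: xs) ≠ (x :: xs).length := by
        simp [mesNat]; omega
      rw [if_neg (fun hc => hnot hc.1)]
      have happ : (xs ++ y :: ys).takeWhile (fun z => z == x)
          = xs.takeWhile (fun z => z == x) := by
        rw [List.takeWhile_append, if_neg (by omega)]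
      simp [mesNat, List.cons_append, happ]

theorem plateauDC_eq_mesNat (fuel : Nat) :
    ∀ (l : List Int), l.length ≤ fuel → plateauDC fuel l = (mesNat l : Int) := by
  induction fuel with
  | zero =>
    intro l hl
    match l, hl with
    | [], _ => simp [plateauDC, mesNat]
  | succ fuel ih =>
    intro l hl
    rw [plateauDC]
    by_cases h : l.length ≤ 1
    · rw [if_pos h]
      match l, h with
      | [], _ => simp [mesNat]
      | [x], _ => simp [mesNat]
    · rw [if_neg h]
      simp only []
      have hlen2 : 2 ≤ l.length := by omega
      have hltake : (l.take (l.length / 2)).length = l.length / 2 := by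
        simp; omega
      have hldrop : (l.drop (l.length / 2)).length = l.length - l.length / 2 := by simp
      have ihL := ih (l.take (l.length / 2)) (by omega)
      have ihR := ih (l.drop (l.length / 2)) (by rw [hldrop]; omega)
      have hsplit : l = l.take (l.length / 2) ++ l.drop (l.length / 2) :=
        (List.take_append_drop _ _).symm
      have hTne : l.take (l.length / 2) ≠ [] := by
        intro he; rw [he] at hltake; simp at hltake; omega
      have hDne : l.drop (l.length / 2) ≠ [] := by
        intro he; rw [he] at hldrop; simp at hldrop; omega
      rw [ihL, ihR]
      conv_rhs => rw [hsplit]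
      rw [mesNat_append _ _ hTne hDne]
      by_cases hc : mesNat (l.take (l.length / 2)) = (l.take (l.length / 2)).length ∧
          (l.take (l.length / 2)).getLast? = (l.drop (l.length / 2)).head?
      · rw [if_pos hc, if_pos ⟨by rw [hc.1, hltake], hc.2⟩, hltake]
        omega
      · rw [if_neg hc]
        rw [if_neg (by
          intro hc2
          apply hc
          refine ⟨?_, hc2.2⟩
          have := hc2.1
          rw [hltake]
          exact_mod_cast this)]

theorem B_eq_mesNat (l : List Int) : contarUnaMeseta_alt l = (mesNat l : Int) :=
  plateauDC_eq_mesNat l.length l le_rfl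

-- ===== VERDICT (by name: the statement is the Claim_ definition above) =====
theorem contarUnaMeseta_spec : Claim_equal_contarUnaMeseta := by
  intro l _
  unfold Spec_contarUnaMeseta
  rw [A_eq_mesNat, B_eq_mesNat]
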